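-- pv_equiv track=rewrite | github.com/Adamssss/projectEuler | pb345.py | smallmatrixsum
-- ===== SOURCE A (Python) =====
-- def QPL(mylist):
--     if len(mylist) == 1:
--         return [mylist]
--     qpl = []
--     for i in mylist:
--         rest = mylist[:]
--         rest.remove(i)
--         for j in QPL(rest):
--             qpl.append([i]+j)
--     return qpl
--
-- def smallmatrixsum(gd):
--     temp = []
--     size = len(gd)
--     for i in range(size):
--         temp.append(i)
--     r = 0
--     for i in QPL(temp):
--         t = 0
--         for j in range(size):
--             t += gd[j][i[j]]
--         if t > r:
--             r = t
--     return r
-- ===== SOURCE B (Python) =====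
-- def smallmatrixsum(gd):
--     n = len(gd)
--
--     def best(j, cols):
--         if not cols:
--             return 0
--         return max(gd[j][c] + best(j + 1, [d for d in cols if d != c]) for c in cols)
--
--     return max(0, best(0, list(range(n))))
-- ===== Notes on version B (the rewrite author's own statement) =====
-- stated objective: alternative
-- what changed: B replaces A's materialize-all-n!-permutations-then-scan (QPL builds the full list of permutations, then a second pass sums each and keeps the running max) with a direct recursive maximizer over the remaining columns that computes the max assignment sum without ever building a permutation list.
import Mathlib
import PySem

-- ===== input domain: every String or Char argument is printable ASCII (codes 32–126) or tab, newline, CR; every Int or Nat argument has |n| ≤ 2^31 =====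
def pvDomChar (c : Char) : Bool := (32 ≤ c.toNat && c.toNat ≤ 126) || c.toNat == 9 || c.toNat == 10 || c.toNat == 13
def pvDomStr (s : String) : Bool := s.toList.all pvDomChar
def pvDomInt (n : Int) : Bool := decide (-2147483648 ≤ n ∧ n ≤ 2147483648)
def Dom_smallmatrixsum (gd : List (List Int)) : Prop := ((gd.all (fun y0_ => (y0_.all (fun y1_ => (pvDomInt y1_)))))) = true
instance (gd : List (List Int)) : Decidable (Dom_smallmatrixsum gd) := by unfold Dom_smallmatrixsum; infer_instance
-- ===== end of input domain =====

-- B computes the same max-assignment sum by direct recursion over the remaining columns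
-- instead of materializing the full list of n! permutations and scanning it (objective: alternative).

-- gd[j][c] for indices that are in range under Pre_; the default 0 is never reached there
def entryAt (gd : List (List Int)) (j c : Int) : Int :=
  (PySem.List.pyGet? ((PySem.List.pyGet? gd j).getD []) c).getD 0

-- ===== PORT A =====
-- A's QPL: all permutations of mylist, built by prepending each element to the
-- permutations of the rest (rest = mylist with the first occurrence of i removed)
def QPL (mylist : List Int) : List (List Int) :=
  if mylist.length = 1 then [mylist]
  else
    mylist.attach.foldl
      (fun qpl i => qpl ++ (QPL (mylist.erase i.1)).map (fun j => i.1 :: j)) []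
termination_by mylist.length
decreasing_by
  have h1 := List.length_erase_of_mem i.2
  have h2 := List.length_pos_of_mem i.2
  omega

def smallmatrixsum (gd : List (List Int)) : Int :=
  let size := gd.length
  let temp := (List.range size).map (fun (k : Nat) => (k : Int))
  (QPL temp).foldl
    (fun r i =>
      let t := (List.range size).foldl
        (fun (t : Int) (j : Nat) => t + entryAt gd (j : Int) ((PySem.List.pyGet? i (j : Int)).getD 0)) 0
      if t > r then t else r) 0

-- ===== PORT B =====
-- B's best(j, cols): max over c in cols of gd[j][c] + best(j+1, cols without c)
def bestRec (gd : List (List Int)) (j : Int) (cols : List Int) : Int :=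
  match cols with
  | [] => 0
  | c0 :: rest =>
    rest.attach.foldl
      (fun acc c =>
        max acc (entryAt gd j c.1 + bestRec gd (j + 1) ((c0 :: rest).filter (fun d => d != c.1))))
      (entryAt gd j c0 + bestRec gd (j + 1) ((c0 :: rest).filter (fun d => d != c0)))
termination_by cols.length
decreasing_by
  · exact List.length_filter_lt_length_iff_exists.mpr ⟨c.1, List.mem_cons_of_mem _ c.2, by simp⟩
  · exact List.length_filter_lt_length_iff_exists.mpr ⟨c0, List.mem_cons_self, by simp⟩

def smallmatrixsum_alt (gd : List (List Int)) : Int :=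
  max 0 (bestRec gd 0 ((List.range gd.length).map (fun (k : Nat) => (k : Int))))

-- ===== PRECONDITION & SPEC =====
-- Pre_ excludes exactly the ragged inputs on which A raises IndexError:
-- some row shorter than the number of rows (every column 0..n-1 is read in every row).
def Pre_smallmatrixsum (gd : List (List Int)) : Prop := ∀ row ∈ gd, gd.length ≤ row.length
instance (gd : List (List Int)) : Decidable (Pre_smallmatrixsum gd) := by
  unfold Pre_smallmatrixsum; infer_instance

def pvWitness_smallmatrixsum : List (List Int) := [[1, 2], [3, 4]]

def Spec_smallmatrixsum (gd : List (List Int)) (out : Int) : Prop := out = smallmatrixsum_alt gd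
instance (gd : List (List Int)) (out : Int) : Decidable (Spec_smallmatrixsum gd out) := by
  unfold Spec_smallmatrixsum; infer_instance

-- ===== CLAIM (what is proved, stated in full; the proofs are below) =====
def Claim_equal_smallmatrixsum : Prop :=
  ∀ (gd : List (List Int)), Dom_smallmatrixsum gd → Pre_smallmatrixsum gd →
    Spec_smallmatrixsum gd (smallmatrixsum gd)

-- ===== LEMMAS AND PROOFS =====

-- the structural per-row sum of an assignment p starting at row j
def sumFrom (gd : List (List Int)) : Int → List Int → Int
  | _, [] => 0
  | j, c :: p => entryAt gd j c + sumFrom gd (j + 1) p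

-- QPL unfolded to a flatMap when the length-1 base case does not apply
theorem QPL_flat (mylist : List Int) (h : mylist.length ≠ 1) :
    QPL mylist = mylist.flatMap (fun i => (QPL (mylist.erase i)).map (fun j => i :: j)) := by
  rw [QPL]
  simp only [h, if_false]
  rw [List.foldl_attach (f := fun qpl i => qpl ++ (QPL (mylist.erase i)).map (fun j => i :: j))]
  rw [PySem.List.foldl_append_eq_flatMap]
  simp

theorem QPL_len : ∀ (n : Nat) (cols : List Int), cols.length = n →
    ∀ p ∈ QPL cols, p.length = cols.length := by
  intro n
  induction n using Nat.strong_induction_on with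
  | _ n ih =>
    intro cols hn p hp
    by_cases h1 : cols.length = 1
    · rw [QPL, if_pos h1] at hp
      simp at hp; subst hp; rfl
    · rw [QPL_flat cols h1] at hp
      rcases List.mem_flatMap.mp hp with ⟨i, hi, hpi⟩
      rcases List.mem_map.mp hpi with ⟨q, hq, rfl⟩
      have hlen := List.length_erase_of_mem hi
      have hpos := List.length_pos_of_mem hi
      have := ih (cols.length - 1) (by omega) (cols.erase i) (by omega) q hq
      simp only [List.length_cons]
      omega

-- bestRec on a nonempty list is a running max of the per-choice values
theorem bestRec_cons (gd : List (List Int)) (j c0 : Int) (rest : List Int) :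
    bestRec gd j (c0 :: rest) =
      rest.foldl
        (fun acc c =>
          max acc (entryAt gd j c + bestRec gd (j + 1) ((c0 :: rest).filter (fun d => d != c))))
        (entryAt gd j c0 + bestRec gd (j + 1) ((c0 :: rest).filter (fun d => d != c0))) := by
  rw [bestRec]
  exact List.foldl_attach
    (f := fun acc c =>
      max acc (entryAt gd j c + bestRec gd (j + 1) ((c0 :: rest).filter (fun d => d != c))))

-- pull a max out of the initial accumulator of a running max
theorem foldl_max_init {α : Type} (v : α → Int) :
    ∀ (l : List α) (x init : Int),
      l.foldl (fun a c => max a (v c)) (max init x) =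
        max init (l.foldl (fun a c => max a (v c)) x) := by
  intro l
  induction l with
  | nil => intro x init; rfl
  | cons c l ih =>
    intro x init
    simp only [List.foldl_cons]
    rw [max_assoc, ih]

theorem add_max_sub (k a b : Int) : k + max (a - k) b = max a (k + b) := by
  rcases le_total (a - k) b with h | h
  · rw [max_eq_right h, max_eq_right (by omega)]
  · rw [max_eq_left h, max_eq_left (by omega)]
    omega

-- a running max of (k + ·) is k plus a running max with shifted start
theorem foldl_max_shift {α : Type} (s : α → Int) :
    ∀ (L : List α) (k init : Int),
      L.foldl (fun a p => max a (k + s p)) init =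
        k + L.foldl (fun a p => max a (s p)) (init - k) := by
  intro L
  induction L with
  | nil => intro k init; simp
  | cons p L ih =>
    intro k init
    simp only [List.foldl_cons]
    rw [ih]
    have hinit : max init (k + s p) - k = max (init - k) (s p) := by
      rcases le_total init (k + s p) with h | h
      · rw [max_eq_right h, max_eq_right (by omega)]
        omega
      · rw [max_eq_left h, max_eq_left (by omega)]
    rw [hinit]

-- A's inner loop over range computes the structural sum of the suffix
theorem tLoop (gd : List (List Int)) (i : List Int) :
    ∀ (n j : Nat) (t : Int), j + n = i.length →
      (List.range' j n).foldl
        (fun (t : Int) (k : Nat) => t + entryAt gd (k : Int) ((PySem.List.pyGet? i (k : Int)).getD 0)) t =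
      t + sumFrom gd (j : Int) (i.drop j) := by
  intro n
  induction n with
  | zero =>
    intro j t hj
    have : i.drop j = [] := List.drop_of_length_le (by omega)
    simp [this, sumFrom]
  | succ n ih =>
    intro j t hj
    have hjlt : j < i.length := by omega
    rw [List.range'_succ]
    rw [List.foldl_cons]
    rw [ih (j + 1) _ (by omega)]
    have hget : PySem.List.pyGet? i (j : Int) = some i[j] := by
      rw [PySem.List.pyGet?_natCast]
      exact List.getElem?_eq_getElem hjlt
    have hdrop : i.drop j = i[j] :: i.drop (j + 1) := List.drop_eq_getElem_cons hjlt
    rw [hdrop, sumFrom, hget]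
    simp only [Option.getD_some]
    push_cast
    ring

-- the main equivalence: running max of the sums of all permutations = bestRec
theorem main_lemma (gd : List (List Int)) :
    ∀ (n : Nat) (cols : List Int), cols.length = n → cols.Nodup → cols ≠ [] →
      ∀ (j init : Int),
        ((QPL cols).map (sumFrom gd j)).foldl max init = max init (bestRec gd j cols) := by
  intro n
  induction n using Nat.strong_induction_on with
  | _ n ih =>
    intro cols hn hnd hne j init
    match cols, hn, hnd, hne with
    | [], hn, hnd, hne => exact absurd rfl hne
    | [c], hn, hnd, hne =>
      rw [QPL]
      simp [sumFrom, bestRec]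
    | c0 :: c1 :: rest, hn, hnd, hne =>
      have hlen1 : (c0 :: c1 :: rest).length ≠ 1 := by simp
      rw [QPL_flat _ hlen1, List.map_flatMap]
      rw [List.foldl_flatMap]
      have hstep : ∀ (acc : Int), ∀ i ∈ c0 :: c1 :: rest,
          (((QPL ((c0 :: c1 :: rest).erase i)).map (fun p => i :: p)).map
            (sumFrom gd j)).foldl max acc =
          max acc (entryAt gd j i + bestRec gd (j + 1) ((c0 :: c1 :: rest).erase i)) := by
        intro acc i hi
        rw [List.map_map]
        have hcomp : (sumFrom gd j ∘ fun p => i :: p) =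
            fun p => entryAt gd j i + sumFrom gd (j + 1) p := by
          funext p; simp [Function.comp, sumFrom]
        rw [hcomp]
        have herlen := List.length_erase_of_mem hi
        have herne : (c0 :: c1 :: rest).erase i ≠ [] := by
          intro hnil
          have h0 : ((c0 :: c1 :: rest).erase i).length = 0 := by rw [hnil]; rfl
          simp only [List.length_cons] at herlen h0
          omega
        have hihE := ih (((c0 :: c1 :: rest).erase i).length)
          (by simp only [List.length_cons] at herlen hn ⊢; omega)
          ((c0 :: c1 :: rest).erase i) rfl (hnd.erase i) herne (j + 1)
        simp only [List.foldl_map]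
        rw [foldl_max_shift (fun p => sumFrom gd (j + 1) p)]
        have h2 := hihE (acc - entryAt gd j i)
        simp only [List.foldl_map] at h2
        rw [h2, add_max_sub]
      rw [PySem.List.foldl_congr_mem _ _
        (fun acc i =>
          max acc (entryAt gd j i + bestRec gd (j + 1) ((c0 :: c1 :: rest).erase i)))
        init hstep]
      simp only [List.Nodup.erase_eq_filter hnd]
      calc
        (c0 :: c1 :: rest).foldl
            (fun acc i =>
              max acc (entryAt gd j i +
                bestRec gd (j + 1) ((c0 :: c1 :: rest).filter (fun d => d != i)))) init
          = (c1 :: rest).foldl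
            (fun acc i =>
              max acc (entryAt gd j i +
                bestRec gd (j + 1) ((c0 :: c1 :: rest).filter (fun d => d != i))))
            (max init (entryAt gd j c0 +
              bestRec gd (j + 1) ((c0 :: c1 :: rest).filter (fun d => d != c0)))) := rfl
        _ = max init ((c1 :: rest).foldl
            (fun acc i =>
              max acc (entryAt gd j i +
                bestRec gd (j + 1) ((c0 :: c1 :: rest).filter (fun d => d != i))))
            (entryAt gd j c0 +
              bestRec gd (j + 1) ((c0 :: c1 :: rest).filter (fun d => d != c0)))) :=
          foldl_max_init _ (c1 :: rest) _ init
        _ = max init (bestRec gd j (c0 :: c1 :: rest)) := by rw [bestRec_cons]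

theorem temp_nodup (n : Nat) : ((List.range n).map (fun (k : Nat) => (k : Int))).Nodup := by
  apply List.Nodup.map _ List.nodup_range
  intro a b h
  simpa using h

-- ===== VERDICT (by name: the statement is the Claim_ definition above) =====
theorem smallmatrixsum_spec : Claim_equal_smallmatrixsum := by
  intro gd _ _
  show smallmatrixsum gd = smallmatrixsum_alt gd
  have hA : smallmatrixsum gd =
      (QPL ((List.range gd.length).map (fun (k : Nat) => (k : Int)))).foldl
        (fun r i => max r (sumFrom gd 0 i)) 0 := by
    show (QPL ((List.range gd.length).map (fun (k : Nat) => (k : Int)))).foldl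
        (fun r i =>
          let t := (List.range gd.length).foldl
            (fun (t : Int) (j : Nat) => t + entryAt gd (j : Int) ((PySem.List.pyGet? i (j : Int)).getD 0)) 0
          if t > r then t else r) 0 =
      (QPL ((List.range gd.length).map (fun (k : Nat) => (k : Int)))).foldl
        (fun r i => max r (sumFrom gd 0 i)) 0
    apply PySem.List.foldl_congr_mem
    intro r i hi
    have hilen : i.length = gd.length := by
      have := QPL_len _ _ rfl i hi
      simpa using this
    have ht := tLoop gd i gd.length 0 0 (by omega)
    dsimp only
    rw [List.range_eq_range', ht]
    simp only [Nat.cast_zero, List.drop_zero, zero_add]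
    rw [max_def]
    split_ifs <;> omega
  rw [hA]
  by_cases h0 : gd.length = 0
  · rw [h0]
    show (QPL []).foldl (fun r i => max r (sumFrom gd 0 i)) 0 = smallmatrixsum_alt gd
    rw [QPL]
    simp [smallmatrixsum_alt, h0, bestRec]
  · have hne : (List.range gd.length).map (fun (k : Nat) => (k : Int)) ≠ [] := by
      simp only [ne_eq, List.map_eq_nil_iff, List.range_eq_nil]
      omega
    have hm := main_lemma gd _ _ rfl (temp_nodup gd.length) hne 0 0
    simp only [List.foldl_map] at hm
    show _ = max 0 (bestRec gd 0 ((List.range gd.length).map (fun (k : Nat) => (k : Int))))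
    exact hm
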